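-- pv_equiv track=rewrite | github.com/sparklost/endcord-debug | endcord/search.py | fuzzy_match_score_single
-- ===== SOURCE A (Python) =====
-- def fuzzy_match_score_single(query, candidate):
--     """
--     Calculates score for fuzzy matching of single query word.
--     Consecutive matches will have larger score.
--     Matches closer to the start of the candidate string will have larger score.
--     Score is not limited.
--     """
--     query_lower, candidate_lower = query.lower(), candidate.lower()
--     qlen, clen = len(query), len(candidate)
--     qpos, cpos = 0, 0
--     score = 0
--     last_match_pos = -1
--     while qpos < qlen and cpos < clen:
--         if query_lower[qpos] == candidate_lower[cpos]:
--             if last_match_pos == cpos - 1: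
--                 score += 10   # consecutive match adds more score
--             else:
--                 score += 1   # match after some gap
--             last_match_pos = cpos
--             qpos += 1
--         cpos += 1
--     if qpos == qlen:
--         # bonus for match starting early in candidate
--         score += max(0, 10 - last_match_pos)
--         return score
--     return 0
-- ===== SOURCE B (Python) =====
-- def fuzzy_match_score_single(query, candidate):
--     q = query.lower()
--     c = candidate.lower()
--     positions = []
--     qi = 0
--     for ci, ch in enumerate(c):
--         if qi < len(q) and q[qi] == ch:
--             positions.append(ci)
--             qi += 1
--     if qi < len(q):
--         return 0
--     score = 0
--     prev = -1
--     for p in positions: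
--         score += 10 if p == prev + 1 else 1
--         prev = p
--     return score + max(0, 10 - prev)
-- ===== Notes on version B (the rewrite author's own statement) =====
-- stated objective: alternative
-- what changed: Replaces A's single while-loop with interleaved scoring state by a two-phase design: a greedy two-pointer scan that records matched candidate indices, then a separate pass over that position list computing consecutive-match bonuses and the early-start bonus.
import Mathlib
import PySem

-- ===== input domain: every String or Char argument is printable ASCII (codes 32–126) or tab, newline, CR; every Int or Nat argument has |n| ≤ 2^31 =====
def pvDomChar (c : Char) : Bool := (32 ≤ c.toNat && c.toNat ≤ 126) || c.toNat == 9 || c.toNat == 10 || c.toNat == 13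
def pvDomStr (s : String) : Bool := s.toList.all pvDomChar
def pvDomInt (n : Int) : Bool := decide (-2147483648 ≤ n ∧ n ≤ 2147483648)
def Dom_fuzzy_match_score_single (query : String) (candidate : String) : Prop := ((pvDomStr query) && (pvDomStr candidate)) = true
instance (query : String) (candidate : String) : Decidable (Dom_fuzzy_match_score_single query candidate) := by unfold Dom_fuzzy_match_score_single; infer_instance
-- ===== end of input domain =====

-- B restructures A's single stateful while-loop into two phases (match-position scan, then scoring pass); same cost, no behaviour change.

-- ===== PORT A =====
-- A's while loop: state (remaining query, remaining candidate, cpos, score, last_match_pos);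
-- returns (remaining query, score, last_match_pos) when qpos = qlen or cpos = clen.
def fuzzyA_loop : List Char → List Char → Int → Int → Int → List Char × Int × Int
  | qs, [], _, score, last => (qs, score, last)
  | [], _ :: _, _, score, last => ([], score, last)
  | q :: qt, c :: ct, cpos, score, last =>
      if q = c then
        fuzzyA_loop qt ct (cpos + 1) (score + (if last = cpos - 1 then 10 else 1)) cpos
      else
        fuzzyA_loop (q :: qt) ct (cpos + 1) score last

def fuzzy_match_score_single (query : String) (candidate : String) : Int :=
  let ql := (PySem.Str.lower query).toList
  let cl := (PySem.Str.lower candidate).toList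
  let r := fuzzyA_loop ql cl 0 0 (-1)
  if r.1 = [] then r.2.1 + max 0 (10 - r.2.2) else 0

-- ===== PORT B =====
-- B phase 1: greedy scan collecting matched candidate indices (enumerate ported as an index counter);
-- returns (positions, remaining query).
def fuzzyB_scan : List Char → List Char → Int → List Int × List Char
  | qs, [], _ => ([], qs)
  | [], _ :: rest, ci => fuzzyB_scan [] rest (ci + 1)
  | q :: qt, ch :: rest, ci =>
      if q = ch then
        let r := fuzzyB_scan qt rest (ci + 1)
        (ci :: r.1, r.2)
      else
        fuzzyB_scan (q :: qt) rest (ci + 1)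

-- B phase 2: fold over the position list; returns (score, prev).
def fuzzyB_score : List Int → Int → Int → Int × Int
  | [], prev, score => (score, prev)
  | p :: rest, prev, score => fuzzyB_score rest p (score + (if p = prev + 1 then 10 else 1))

def fuzzy_match_score_single_alt (query : String) (candidate : String) : Int :=
  let ql := (PySem.Str.lower query).toList
  let cl := (PySem.Str.lower candidate).toList
  let scan := fuzzyB_scan ql cl 0
  if scan.2 = [] then
    let sc := fuzzyB_score scan.1 (-1) 0
    sc.1 + max 0 (10 - sc.2)
  else 0

-- ===== PRECONDITION & SPEC =====
def Spec_fuzzy_match_score_single (query : String) (candidate : String) (out : Int) : Prop := out = fuzzy_match_score_single_alt query candidate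
instance (query : String) (candidate : String) (out : Int) : Decidable (Spec_fuzzy_match_score_single query candidate out) := by unfold Spec_fuzzy_match_score_single; infer_instance

-- ===== CLAIM (what is proved, stated in full; the proofs are below) =====
def Claim_equal_fuzzy_match_score_single : Prop := ∀ (query : String) (candidate : String), Dom_fuzzy_match_score_single query candidate → Spec_fuzzy_match_score_single query candidate (fuzzy_match_score_single query candidate)

-- ===== LEMMAS AND PROOFS =====

-- With an exhausted query, B's scan consumes the candidate and returns ([], []).
theorem fuzzyB_scan_empty (cs : List Char) (ci : Int) :
    fuzzyB_scan [] cs ci = ([], []) := by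
  induction cs generalizing ci with
  | nil => rfl
  | cons c ct ih => simp [fuzzyB_scan, ih]

-- A's loop equals B's scan followed by B's scoring pass.
theorem fuzzyA_eq_scan_score (cs qs : List Char) (cpos score last : Int) :
    fuzzyA_loop qs cs cpos score last =
      ((fuzzyB_scan qs cs cpos).2,
        fuzzyB_score (fuzzyB_scan qs cs cpos).1 last score) := by
  induction cs generalizing qs cpos score last with
  | nil => cases qs <;> simp [fuzzyA_loop, fuzzyB_scan, fuzzyB_score]
  | cons c ct ih =>
      cases qs with
      | nil =>
          simp [fuzzyA_loop, fuzzyB_scan, fuzzyB_scan_empty, fuzzyB_score]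
      | cons q qt =>
          by_cases h : q = c
          · subst h
            simp only [fuzzyA_loop, fuzzyB_scan]
            rw [ih]
            have hcond : (if last = cpos - 1 then (10 : Int) else 1) =
                (if cpos = last + 1 then (10 : Int) else 1) := by
              by_cases hl : last = cpos - 1
              · rw [if_pos hl, if_pos (by omega)]
              · rw [if_neg hl, if_neg (by omega)]
            simp [fuzzyB_score, hcond]
          · simp only [fuzzyA_loop, fuzzyB_scan, if_neg h]
            rw [ih]

-- ===== VERDICT (by name: the statement is the Claim_ definition above) =====
theorem fuzzy_match_score_single_spec : Claim_equal_fuzzy_match_score_single := by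
  intro query candidate _
  unfold Spec_fuzzy_match_score_single
  unfold fuzzy_match_score_single fuzzy_match_score_single_alt
  dsimp only
  rw [fuzzyA_eq_scan_score]
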